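-- pv_equiv track=rewrite | github.com/vikram-kv/Unified_Parser | helpers.py | CleanseWord
-- ===== SOURCE A (Python) =====
-- def isEngLetter(p : str) -> int:
--     if (ord(p) >= 97 and ord(p) <= 122):
--         return 1
--     return 0
--
-- def CleanseWord(phone : str) -> str:
--
--     phonecopy = ""
--
--     for c in phone:
--         if (c != '&' and isEngLetter(c) == 0):
--             c = '#'
--         phonecopy += c
--
--     if (phonecopy.find('$') != -1):
--         phonecopy = phonecopy.replace('$','')
--     if (phonecopy.find('&&') != -1):
--         phonecopy = phonecopy.replace('&&','&')
--
--     return phonecopy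
-- ===== SOURCE B (Python) =====
-- def CleanseWord(phone: str) -> str:
--     # single left-to-right pass: map each char, collapsing '&&' pairs on the fly
--     out = []
--     i = 0
--     n = len(phone)
--     while i < n:
--         c = phone[i]
--         if c == '&':
--             out.append('&')
--             i += 2 if i + 1 < n and phone[i + 1] == '&' else 1
--         else:
--             out.append(c if 'a' <= c <= 'z' else '#')
--             i += 1
--     return ''.join(out)
-- ===== Notes on version B (the rewrite author's own statement) =====
-- stated objective: alternative
-- what changed: A builds a mapped copy char-by-char and then runs separate '$'-strip and '&&'-replace passes over it; B does one left-to-right pass that maps each character and collapses '&&' pairs on the fly (skipping the second '&' of a pair), with no replace passes ('$' always maps to '#', so the strip pass is dead).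
import Mathlib
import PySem

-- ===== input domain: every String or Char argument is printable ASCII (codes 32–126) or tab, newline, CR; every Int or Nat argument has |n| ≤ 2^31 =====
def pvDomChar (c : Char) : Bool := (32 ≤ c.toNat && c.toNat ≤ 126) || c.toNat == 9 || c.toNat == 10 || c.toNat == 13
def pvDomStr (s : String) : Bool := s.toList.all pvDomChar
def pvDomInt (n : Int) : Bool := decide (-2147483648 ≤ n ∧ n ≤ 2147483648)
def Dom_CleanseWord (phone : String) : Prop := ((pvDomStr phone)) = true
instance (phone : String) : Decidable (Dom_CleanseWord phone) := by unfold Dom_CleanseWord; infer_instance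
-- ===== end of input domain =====

-- B replaces A's build-then-replace passes (character-mapping loop, then '$' strip, then '&&' replace)
-- by a single left-to-right pass that maps each character and collapses '&&' pairs on the fly (objective: alternative).


-- ===== PORT A =====
def isEngLetter (p : Char) : Int :=
  if 97 ≤ p.toNat ∧ p.toNat ≤ 122 then 1 else 0

def CleanseWord (phone : String) : String :=
  let phonecopy : String :=
    phone.toList.foldl (fun acc c =>
      acc.push (if c ≠ '&' ∧ isEngLetter c = 0 then '#' else c)) ""
  let phonecopy := if PySem.Str.find phonecopy "$" ≠ -1 then PySem.Str.replace phonecopy "$" "" else phonecopy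
  let phonecopy := if PySem.Str.find phonecopy "&&" ≠ -1 then PySem.Str.replace phonecopy "&&" "&" else phonecopy
  phonecopy

-- ===== PORT B =====
-- Source B's single while-loop over the index, as structural recursion on the character list
def altGo : List Char → List Char
  | [] => []
  | '&' :: '&' :: t => '&' :: altGo t
  | '&' :: t => '&' :: altGo t
  | c :: t => (if 'a' ≤ c ∧ c ≤ 'z' then c else '#') :: altGo t

def CleanseWord_alt (phone : String) : String :=
  String.ofList (altGo phone.toList)

-- ===== PRECONDITION & SPEC =====
def Spec_CleanseWord (phone : String) (out : String) : Prop := out = CleanseWord_alt phone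
instance (phone : String) (out : String) : Decidable (Spec_CleanseWord phone out) := by unfold Spec_CleanseWord; infer_instance

-- ===== CLAIM (what is proved, stated in full; the proofs are below) =====
def Claim_equal_CleanseWord : Prop := ∀ (phone : String), Dom_CleanseWord phone → Spec_CleanseWord phone (CleanseWord phone)

-- ===== LEMMAS AND PROOFS =====

-- equation lemmas for altGo's overlapping patterns
theorem altGo_amp_cons (c : Char) (t : List Char) (h : c ≠ '&') :
    altGo ('&' :: c :: t) = '&' :: altGo (c :: t) := by
  rw [altGo.eq_def]
  split
  · simp_all
  · next h2 => injection h2 with _ h3; injection h3 with h4 _; exact absurd h4 h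
  · next h2 => injection h2 with _ h3; rw [h3]
  · next hne h2 => injection h2 with h3 _; exact absurd h3.symm hne

theorem altGo_other (c : Char) (t : List Char) (h : c ≠ '&') :
    altGo (c :: t) = (if 'a' ≤ c ∧ c ≤ 'z' then c else '#') :: altGo t := by
  rw [altGo.eq_def]
  split
  · simp_all
  · next h2 => injection h2 with h3 _; exact absurd h3 h
  · next h2 => injection h2 with h3 _; exact absurd h3 h
  · next h2 => injection h2 with h3 h4; rw [h3, h4]

-- the per-character mapping performed by A's loop
def fmap (c : Char) : Char := if c ≠ '&' ∧ isEngLetter c = 0 then '#' else c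

theorem fmap_char (c : Char) :
    fmap c = if c = '&' then '&' else if 97 ≤ c.toNat ∧ c.toNat ≤ 122 then c else '#' := by
  unfold fmap isEngLetter
  by_cases hAmp : c = '&'
  · subst hAmp; simp
  · by_cases hL : 97 ≤ c.toNat ∧ c.toNat ≤ 122
    · simp [hAmp, hL]
    · simp [hAmp, hL]

theorem foldl_push_eq_map (l : List Char) (s : String) :
    (l.foldl (fun acc c => acc.push (fmap c)) s).toList = s.toList ++ l.map fmap := by
  induction l generalizing s with
  | nil => simp
  | cons c t ih => simp [List.foldl, ih, String.toList_push]

theorem fmap_ne_dollar (c : Char) : fmap c ≠ '$' := by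
  rw [fmap_char]
  split_ifs with h1 h2
  · decide
  · intro hc; subst hc; revert h2; decide
  · decide

theorem fmap_eq_amp_iff (c : Char) : fmap c = '&' ↔ c = '&' := by
  rw [fmap_char]
  split_ifs with h1 h2
  · simp [h1]
  · simp [h1]
  · simp [h1]

theorem fmap_amp : fmap '&' = '&' := (fmap_eq_amp_iff '&').mpr rfl

theorem fmap_of_ne (c : Char) (h : c ≠ '&') :
    fmap c = if 'a' ≤ c ∧ c ≤ 'z' then c else '#' := by
  rw [fmap_char, if_neg h]
  have hle : ('a' ≤ c ∧ c ≤ 'z') ↔ (97 ≤ c.toNat ∧ c.toNat ≤ 122) := by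
    rw [Char.le_def, Char.le_def, UInt32.le_iff_toNat_le, UInt32.le_iff_toNat_le]
    rfl
  by_cases hL : 97 ≤ c.toNat ∧ c.toNat ≤ 122
  · rw [if_pos hL, if_pos (hle.mpr hL)]
  · rw [if_neg hL, if_neg (fun hc => hL (hle.mp hc))]

theorem dollar_not_infix (l : List Char) : ¬ (['$'] <:+: l.map fmap) := by
  intro h
  have : '$' ∈ l.map fmap := h.mem (by simp)
  obtain ⟨c, _, hc⟩ := List.mem_map.mp this
  exact fmap_ne_dollar c hc

-- A's replace('&&','&') over the mapped characters is exactly B's single pass over the raw characters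
theorem replace_go_eq_altGo (fuel : Nat) (l : List Char) (acc : List Char)
    (hf : l.length ≤ fuel) :
    PySem.Chars.replace.go ['&', '&'] ['&'] fuel (l.map fmap) acc
      = acc.reverse ++ altGo l := by
  induction fuel generalizing l acc with
  | zero =>
    have : l = [] := List.length_eq_zero_iff.mp (Nat.le_zero.mp hf)
    subst this
    simp [PySem.Chars.replace.go, altGo]
  | succ fuel ih =>
    match l with
    | [] => simp [PySem.Chars.replace.go, altGo]
    | c :: t =>
      by_cases hc : c = '&'
      · subst hc
        match t with
        | [] =>
          rw [show (['&'] : List Char).map fmap = ['&'] by simp [fmap_amp]]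
          rw [PySem.Chars.replace.go]
          simp only [show List.isPrefixOf ['&','&'] ['&'] = false by decide,
            Bool.false_eq_true, if_neg, not_false_iff]
          have := ih ([] : List Char) ('&' :: acc) (by simp)
          simp only [List.map_nil] at this
          rw [this]
          simp [altGo]
        | c' :: t' =>
          by_cases hc' : c' = '&'
          · subst hc'
            rw [show (('&' :: '&' :: t').map fmap) = '&' :: '&' :: t'.map fmap by
              simp [fmap_amp]]
            rw [PySem.Chars.replace.go]
            simp only [show List.isPrefixOf ['&','&'] ('&' :: '&' :: t'.map fmap) = true by
              simp [List.isPrefixOf], if_pos]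
            rw [show List.drop (['&','&'] : List Char).length ('&' :: '&' :: t'.map fmap)
                = t'.map fmap by simp]
            rw [show (['&'] : List Char).reverse ++ acc = '&' :: acc by rfl]
            rw [ih t' ('&' :: acc) (by simp at hf ⊢; omega)]
            simp [altGo]
          · have hfc' : fmap c' ≠ '&' := fun h => hc' ((fmap_eq_amp_iff c').mp h)
            rw [show (('&' :: c' :: t').map fmap) = '&' :: fmap c' :: t'.map fmap by
              simp [fmap_amp]]
            rw [PySem.Chars.replace.go]
            simp only [show List.isPrefixOf ['&','&'] ('&' :: fmap c' :: t'.map fmap) = false by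
              simp [List.isPrefixOf, hfc'.symm], Bool.false_eq_true, if_neg, not_false_iff]
            rw [show (fmap c' :: t'.map fmap) = (c' :: t').map fmap by simp]
            rw [ih (c' :: t') ('&' :: acc) (by simp at hf ⊢; omega)]
            rw [altGo_amp_cons c' t' hc']
            simp
      · have hfc : fmap c ≠ '&' := fun h => hc ((fmap_eq_amp_iff c).mp h)
        rw [show ((c :: t).map fmap) = fmap c :: t.map fmap by simp]
        rw [PySem.Chars.replace.go]
        simp only [show List.isPrefixOf ['&','&'] (fmap c :: t.map fmap) = false by
          simp [List.isPrefixOf, hfc.symm], Bool.false_eq_true, if_neg, not_false_iff]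
        rw [ih t (fmap c :: acc) (by simp at hf ⊢; omega)]
        rw [altGo_other c t hc, ← fmap_of_ne c hc]
        simp

-- when no '&&' occurs, B's pass is the plain character map
theorem altGo_eq_map : ∀ (l : List Char), ¬ (['&','&'] <:+: l.map fmap) → altGo l = l.map fmap := by
  intro l
  induction l using altGo.induct with
  | case1 => intro _; rfl
  | case2 t ih =>
    intro h
    exact absurd (List.IsPrefix.isInfix ⟨t.map fmap, by simp [fmap_amp]⟩) h
  | case3 t h2 ih =>
    match t, h2, ih with
    | [], _, _ => intro _; simp [altGo, fmap_amp]
    | c' :: t', h2, ih =>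
      intro h
      have hc' : c' ≠ '&' := fun hh => h2 t' (by rw [hh])
      rw [altGo_amp_cons c' t' hc', ih ?_]
      · simp [fmap_amp]
      · intro hinf
        exact h (by simp only [List.map_cons, fmap_amp]; exact List.infix_cons hinf)
  | case4 c t h1 h2 ih =>
    intro h
    have hc : c ≠ '&' := fun hh => h2 hh
    rw [altGo_other c t hc, ih ?_, ← fmap_of_ne c hc]
    · simp
    · intro hinf
      exact h (by simp only [List.map_cons]; exact List.infix_cons hinf)

theorem toList_eq (phone : String) :
    (CleanseWord phone).toList = (CleanseWord_alt phone).toList := by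
  unfold CleanseWord CleanseWord_alt
  have hmap : ((phone.toList.foldl (fun acc c =>
      acc.push (if c ≠ '&' ∧ isEngLetter c = 0 then '#' else c)) "")).toList
      = phone.toList.map fmap := by
    simpa [fmap] using foldl_push_eq_map phone.toList ""
  have hdollar : PySem.Str.find (phone.toList.foldl (fun acc c =>
      acc.push (if c ≠ '&' ∧ isEngLetter c = 0 then '#' else c)) "") "$" = -1 := by
    rw [PySem.Str.find_eq_neg_one_iff, hmap]
    exact dollar_not_infix phone.toList
  simp only [hdollar, ne_eq, not_true_eq_false, if_false]
  by_cases hfind : PySem.Str.find (phone.toList.foldl (fun acc c =>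
      acc.push (if c ≠ '&' ∧ isEngLetter c = 0 then '#' else c)) "") "&&" = -1
  · rw [if_neg (by simpa using hfind)]
    rw [hmap]
    rw [altGo_eq_map phone.toList (by
      have := (PySem.Str.find_eq_neg_one_iff _ _).mp hfind
      rw [hmap] at this
      simpa using this)]
    simp
  · rw [if_pos (by simpa using hfind)]
    rw [PySem.Str.toList_replace, hmap]
    have : PySem.Chars.replace (phone.toList.map fmap) "&&".toList "&".toList
        = altGo phone.toList := by
      rw [show ("&&".toList) = ['&','&'] from rfl, show ("&".toList) = ['&'] from rfl]
      rw [PySem.Chars.replace]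
      rw [if_neg (by simp)]
      have := replace_go_eq_altGo ((phone.toList.map fmap).length) phone.toList []
        (by simp)
      simpa using this
    rw [this]
    simp

-- ===== VERDICT (by name: the statement is the Claim_ definition above) =====
theorem CleanseWord_spec : Claim_equal_CleanseWord := by
  intro phone _
  unfold Spec_CleanseWord
  have := toList_eq phone
  exact String.toList_inj.mp this
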